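-- pv_equiv track=rewrite | github.com/axiuya/stock-learn | che_parser.py | parse_wave
-- ===== SOURCE A (Python) =====
-- WAVE_BIT = [0b00000011, 0b00001100, 0b00110000, 0b11000000]
--
-- MOVE = [0, 2, 4, 6]
--
-- def parse_wave(group, wave_len, high_len, data, start):
--     """解析波形数组"""
--     arr = [0] * int(wave_len * group)
--     i = 0
--     for n in range(group):
--         for j in range(wave_len):
--             arr[i] = calculate(wave_len, high_len, data, start, n, j)
--             i += 1
--     return arr
--
-- def calculate(wave_len, high_len, data, start, group, index):
--     # 数据范围是“左开右闭”，以心电波形数据为例，其他同理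
--     # ============================================
--     # 心电波形: (119, 371] == >: 252
--     # ============================================
--     # 心电波形1(高位)(119, 132] == >: 13
--     # 心电波形1(低位)(132, 182] == >: 50
--     # ============================================
--     # 心电波形2(高位)   (182, 195]   ==>: 13
--     # 心电波形2(低位)   (195, 245]   ==>: 50
--     # ============================================
--     # 心电波形3(高位)   (245, 258]   ==>: 13
--     # 心电波形3(低位)   (258, 308]   ==>: 50
--     # ============================================
--     # 心电波形4(高位)   (308, 321]   ==>: 13
--     # 心电波形4(低位)   (321, 371]   ==>: 50
--     # ============================================
--     # 4 * 63 ==>: 252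
--     # ============================================
--     # 1个字节有8位
--     # 每个波形的高位占2两位，如下标为119的字节值，8位分别为(132 ~ 136] 4个波形提供高位
--     # ============================================
--     # 以波形1为例：(119, 182]
--     # 假如下标119的值为：55，即：‭0011 0111‬，第0个波形值取(0, 2]的2位(11)
--     # 假如下标119的值为：55，即：‭0011 0111‬，第1个波形值取(2, 4]的2位(01)
--     # 假如下标119的值为：55，即：‭0011 0111‬，第2个波形值取(4, 6]的2位(11)
--     # 假如下标119的值为：55，即：‭0011 0111‬，第3个波形值取(6, 8]的2位(00)
--
--     # 则，(((data[119] & (0000 0011)) >>> 0) << 8) | (data[132] & 0xFF)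
--     # 则，(((data[119] & (0000 1100)) >>> 2) << 8) | (data[133] & 0xFF)
--     # 则，(((data[119] & (0011 0000)) >>> 4) << 8) | (data[134] & 0xFF)
--     # 则，(((data[119] & (1100 0000)) >>> 6) << 8) | (data[135] & 0xFF)
--
--     # 共有4组，每组占63个字节，n记录是第几组，假如第0组的第9个值，
--     # 即，
--     # 高位为：data[(n * 63) + (i / 4) + start]  ==>: data[(0 * 63) + (8 / 4) + 119] = data[121]
--     # (data[121] & WAVE_BIT[i % 4]) >>> MOVE[i % 4]
--     #
--     # 低位为：data[(n * 63) + 13 + start]  ==>: data[(0 * 63) + 13 + 119] = data[132]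
--     # (data[132] & 0xFF)
--
--     # 高位 | 低位  ==> 波形值
--
--     size = wave_len + high_len
--     high = ((((data[group * size + int(index / 4) + start] & 0xFF) & WAVE_BIT[index % 4]) >> MOVE[index % 4]) << 8)
--     low = (data[group * size + high_len + index + start] & 0xFF)
--     return high | low
-- ===== SOURCE B (Python) =====
-- def _sample(hb, k, low):
--     """combine the k-th 2-bit high field of hb with a low byte"""
--     return (((hb >> (2 * k)) & 0x03) << 8) | (low & 0xFF)
--
-- def parse_wave(group, wave_len, high_len, data, start):
--     """解析波形数组 — byte-major: read each packed high byte once and unpack its four 2-bit fields"""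
--     arr = [0] * int(wave_len * group)
--     size = wave_len + high_len
--     pos = 0
--     for n in range(group):
--         base = n * size + start
--         for b in range((wave_len + 3) // 4):
--             hb = data[base + b] & 0xFF
--             for k in range(4):
--                 index = 4 * b + k
--                 if index < wave_len:
--                     arr[pos] = _sample(hb, k, data[base + high_len + index])
--                     pos += 1
--     return arr
-- ===== Notes on version B (the rewrite author's own statement) =====
-- stated objective: alternative
-- what changed: A calls calculate() per sample, recomputing index//4, index%4 and re-reading the packed high byte (with WAVE_BIT/MOVE table lookups) four times; B iterates byte-major, reading each packed high byte once per group and unpacking its four 2-bit fields inline, writing samples in the same left-to-right order.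
import Mathlib
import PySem

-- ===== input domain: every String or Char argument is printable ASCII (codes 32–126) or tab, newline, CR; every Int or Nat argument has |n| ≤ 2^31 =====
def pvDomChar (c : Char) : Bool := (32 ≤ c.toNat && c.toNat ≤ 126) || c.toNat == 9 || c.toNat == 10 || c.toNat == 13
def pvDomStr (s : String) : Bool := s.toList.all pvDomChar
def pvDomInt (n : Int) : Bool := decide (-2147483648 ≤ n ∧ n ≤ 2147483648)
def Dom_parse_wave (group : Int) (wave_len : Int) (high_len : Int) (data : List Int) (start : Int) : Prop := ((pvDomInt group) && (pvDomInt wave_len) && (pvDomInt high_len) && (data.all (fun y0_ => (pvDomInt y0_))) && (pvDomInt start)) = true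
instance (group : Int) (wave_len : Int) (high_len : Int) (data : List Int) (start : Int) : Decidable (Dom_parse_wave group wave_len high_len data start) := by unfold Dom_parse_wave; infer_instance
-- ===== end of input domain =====

-- B restructures A's flat per-sample loop into a byte-major loop that reads each packed
-- high byte once and unpacks its four 2-bit fields (objective: alternative decomposition).
-- Neither version mutates its arguments; the claim is about the return value.

-- ===== PORT A =====
def WAVE_BIT : List Int := [0b00000011, 0b00001100, 0b00110000, 0b11000000]
def MOVE : List Nat := [0, 2, 4, 6]
def calculate (wave_len : Int) (high_len : Int) (data : List Int) (start : Int) (group : Int) (index : Int) : Int :=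
  let size := wave_len + high_len
  let high := ((PySem.Int.band (PySem.Int.band ((PySem.List.pyGet? data (group * size + PySem.Int.truncdiv index 4 + start)).getD 0) 0xFF) ((PySem.List.pyGet? WAVE_BIT (PySem.Int.mod index 4)).getD 0)) >>> ((PySem.List.pyGet? MOVE (PySem.Int.mod index 4)).getD 0)) <<< (8 : Nat)
  let low := PySem.Int.band ((PySem.List.pyGet? data (group * size + high_len + index + start)).getD 0) 0xFF
  PySem.Int.bor high low
def parse_wave (group : Int) (wave_len : Int) (high_len : Int) (data : List Int) (start : Int) : List Int :=
  let arr := List.replicate (wave_len * group).toNat 0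
  let res := (PySem.List.pyRange 0 group 1).foldl (fun (st : List Int × Int) n =>
      (PySem.List.pyRange 0 wave_len 1).foldl (fun (st : List Int × Int) j =>
        (st.1.set st.2.toNat (calculate wave_len high_len data start n j), st.2 + 1)) st) (arr, 0)
  res.1

-- ===== PORT B =====
-- helper _sample of Source B
def sample (hb : Int) (k : Int) (low : Int) : Int :=
  PySem.Int.bor ((PySem.Int.band (hb >>> (2 * k).toNat) 0x03) <<< (8 : Nat)) (PySem.Int.band low 0xFF)

def parse_wave_alt (group : Int) (wave_len : Int) (high_len : Int) (data : List Int) (start : Int) : List Int :=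
  let arr := List.replicate (wave_len * group).toNat 0
  let size := wave_len + high_len
  let res := (PySem.List.pyRange 0 group 1).foldl (fun (st : List Int × Int) n =>
      let base := n * size + start
      (PySem.List.pyRange 0 (PySem.Int.floordiv (wave_len + 3) 4) 1).foldl (fun (st : List Int × Int) b =>
        let hb := PySem.Int.band ((PySem.List.pyGet? data (base + b)).getD 0) 0xFF
        (PySem.List.pyRange 0 4 1).foldl (fun (st : List Int × Int) k =>
          let index := 4 * b + k
          if index < wave_len then
            (st.1.set st.2.toNat (sample hb k ((PySem.List.pyGet? data (base + high_len + index)).getD 0)), st.2 + 1)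
          else st) st) st) (arr, 0)
  res.1

-- ===== PRECONDITION & SPEC =====
-- Pre_ excludes exactly the inputs on which A raises IndexError: the extreme accessed
-- high-/low-byte position (the loops' index set is a union of per-group intervals whose
-- extremes are at n ∈ {0, group-1}, j ∈ {0, wave_len-1}) falls outside Python's
-- (wrap-aware) index range of data; when a loop is empty nothing is accessed.
def Pre_parse_wave (group : Int) (wave_len : Int) (high_len : Int) (data : List Int) (start : Int) : Prop :=
  group ≤ 0 ∨ wave_len ≤ 0 ∨
    (-(data.length : Int) ≤ min 0 ((group - 1) * (wave_len + high_len)) + start + min 0 high_len ∧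
     max 0 ((group - 1) * (wave_len + high_len)) + start
       + max (PySem.Int.floordiv (wave_len - 1) 4) (high_len + wave_len - 1) < (data.length : Int))
instance (group : Int) (wave_len : Int) (high_len : Int) (data : List Int) (start : Int) : Decidable (Pre_parse_wave group wave_len high_len data start) := by unfold Pre_parse_wave; infer_instance

def pvWitness_parse_wave : Int × Int × Int × List Int × Int := (1, 4, 1, [108, 10, 20, 30, 40], 0)

def Spec_parse_wave (group : Int) (wave_len : Int) (high_len : Int) (data : List Int) (start : Int) (out : List Int) : Prop := out = parse_wave_alt group wave_len high_len data start
instance (group : Int) (wave_len : Int) (high_len : Int) (data : List Int) (start : Int) (out : List Int) : Decidable (Spec_parse_wave group wave_len high_len data start out) := by unfold Spec_parse_wave; infer_instance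

-- ===== CLAIM (what is proved, stated in full; the proofs are below) =====
def Claim_equal_parse_wave : Prop := ∀ (group : Int) (wave_len : Int) (high_len : Int) (data : List Int) (start : Int), Dom_parse_wave group wave_len high_len data start → Pre_parse_wave group wave_len high_len data start → Spec_parse_wave group wave_len high_len data start (parse_wave group wave_len high_len data start)

-- ===== LEMMAS AND PROOFS =====
def pvWrite (st : List Int × Int) (vs : List Int) : List Int × Int :=
  vs.foldl (fun st v => (st.1.set st.2.toNat v, st.2 + 1)) st
theorem pvWrite_append (st : List Int × Int) (u v : List Int) :
    pvWrite st (u ++ v) = pvWrite (pvWrite st u) v := by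
  simp [pvWrite, List.foldl_append]
theorem foldl_write_map {α : Type} (L : List α) (f : α → Int) (st : List Int × Int) :
    L.foldl (fun st x => (st.1.set st.2.toNat (f x), st.2 + 1)) st = pvWrite st (L.map f) := by
  simp [pvWrite, List.foldl_map]
theorem foldl_write_filter_map {α : Type} (L : List α) (p : α → Prop) [DecidablePred p]
    (f : α → Int) (st : List Int × Int) :
    L.foldl (fun st x => if p x then (st.1.set st.2.toNat (f x), st.2 + 1) else st) st
      = pvWrite st ((L.filter (fun x => decide (p x))).map f) := by
  induction L generalizing st with
  | nil => simp [pvWrite]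
  | cons a L ih =>
    by_cases h : p a <;> simp [h, ih, pvWrite]
theorem foldl_write_flatMap {α : Type} (L : List α) (h : α → List Int) (st : List Int × Int) :
    L.foldl (fun st x => pvWrite st (h x)) st = pvWrite st (L.flatMap h) := by
  induction L generalizing st with
  | nil => simp [pvWrite]
  | cons a L ih => simp [List.flatMap_cons, pvWrite_append, ih]
theorem nat_bit_lemma (m : Nat) (s : Nat) : (m &&& (3 <<< s)) >>> s = (m >>> s) &&& 3 := by
  apply Nat.eq_of_testBit_eq
  intro i
  simp [Nat.testBit_and, Nat.testBit_shiftRight, Nat.testBit_shiftLeft]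

theorem int_cast_shiftRight (x : Nat) (s : Nat) : ((x : Int) >>> s) = ((x >>> s : Nat) : Int) := rfl

theorem int_bit_lemma (f : Int) (hf : 0 ≤ f) (s : Nat) :
    (PySem.Int.band f ((3 <<< s : Nat) : Int)) >>> s = PySem.Int.band (f >>> s) 3 := by
  obtain ⟨m, rfl⟩ := Int.eq_ofNat_of_zero_le hf
  rw [show ((3:Int) = ((3:Nat):Int)) from rfl]
  rw [PySem.Int.band_natCast, int_cast_shiftRight, int_cast_shiftRight, PySem.Int.band_natCast,
    nat_bit_lemma]

theorem band255_nonneg (e : Int) : 0 ≤ PySem.Int.band e 255 := by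
  rw [PySem.Int.band_comm]
  exact PySem.Int.band_nonneg_of_nonneg_left e (by norm_num)

theorem calc_eq (wave_len high_len : Int) (data : List Int) (start n b k : Int)
    (hb0 : 0 ≤ b) (hk0 : 0 ≤ k) (hk4 : k < 4) :
    calculate wave_len high_len data start n (4 * b + k)
      = sample (PySem.Int.band ((PySem.List.pyGet? data (n * (wave_len + high_len) + start + b)).getD 0) 0xFF) k ((PySem.List.pyGet? data (n * (wave_len + high_len) + start + high_len + (4 * b + k))).getD 0) := by
  unfold calculate sample
  dsimp only
  have hdiv : PySem.Int.truncdiv (4 * b + k) 4 = b := by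
    unfold PySem.Int.truncdiv
    rw [Int.tdiv_eq_ediv_of_nonneg (by omega)]
    omega
  have hmod : PySem.Int.mod (4 * b + k) 4 = k := by
    rw [PySem.Int.mod_eq_emod_of_pos (by omega)]
    omega
  rw [hdiv, hmod]
  have h1 : n * (wave_len + high_len) + b + start = n * (wave_len + high_len) + start + b := by ring
  have h2 : n * (wave_len + high_len) + high_len + (4 * b + k) + start
      = n * (wave_len + high_len) + start + high_len + (4 * b + k) := by ring
  rw [h1, h2]
  set e := PySem.Int.band ((PySem.List.pyGet? data (n * (wave_len + high_len) + start + b)).getD 0) 255 with he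
  interval_cases k
  · rw [show ((PySem.List.pyGet? WAVE_BIT (0:Int)).getD 0) = ((3 <<< 0 : Nat) : Int) from by decide,
      show ((PySem.List.pyGet? MOVE (0:Int)).getD 0) = (0:Nat) from by decide,
      int_bit_lemma e (band255_nonneg _) 0]
    rfl
  · rw [show ((PySem.List.pyGet? WAVE_BIT (1:Int)).getD 0) = ((3 <<< 2 : Nat) : Int) from by decide,
      show ((PySem.List.pyGet? MOVE (1:Int)).getD 0) = (2:Nat) from by decide,
      int_bit_lemma e (band255_nonneg _) 2]
    rfl
  · rw [show ((PySem.List.pyGet? WAVE_BIT (2:Int)).getD 0) = ((3 <<< 4 : Nat) : Int) from by decide,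
      show ((PySem.List.pyGet? MOVE (2:Int)).getD 0) = (4:Nat) from by decide,
      int_bit_lemma e (band255_nonneg _) 4]
    rfl
  · rw [show ((PySem.List.pyGet? WAVE_BIT (3:Int)).getD 0) = ((3 <<< 6 : Nat) : Int) from by decide,
      show ((PySem.List.pyGet? MOVE (3:Int)).getD 0) = (6:Nat) from by decide,
      int_bit_lemma e (band255_nonneg _) 6]
    rfl

theorem chunk_aux (N : Nat) : ∀ (wl : Int), wl ≤ 4 * N →
    PySem.List.pyRange 0 wl 1
      = (PySem.List.pyRange 0 (N : Int) 1).flatMap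
          (fun b => ((PySem.List.pyRange 0 4 1).filter (fun k => decide (4 * b + k < wl))).map (fun k => 4 * b + k)) := by
  induction N with
  | zero =>
    intro wl h
    simp [PySem.List.pyRange_one_eq_nil (by omega : wl ≤ 0), PySem.List.pyRange_one_eq_nil (by omega : (0:Int) ≤ 0)]
  | succ N ih =>
    intro wl h
    have hcast : ((N + 1 : Nat) : Int) = (N : Int) + 1 := by push_cast; ring
    rw [hcast, PySem.List.pyRange_one_succ_right (by positivity), List.flatMap_append]
    have h4 : PySem.List.pyRange 0 4 1 = [0, 1, 2, 3] := by decide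
    by_cases hwl : wl ≤ 4 * N
    · rw [← ih wl hwl]
      have hnil : ((PySem.List.pyRange 0 4 1).filter (fun k => decide (4 * (N:Int) + k < wl))) = [] := by
        rw [h4]
        apply List.filter_eq_nil_iff.mpr
        intro a ha
        fin_cases ha <;> simp <;> omega
      simp [hnil]
    · have hpre : (PySem.List.pyRange 0 (N : Int) 1).flatMap
          (fun b => ((PySem.List.pyRange 0 4 1).filter (fun k => decide (4 * b + k < wl))).map (fun k => 4 * b + k))
          = PySem.List.pyRange 0 (4 * (N:Int)) 1 := by
        rw [ih (4 * (N:Int)) (by omega)]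
        apply List.flatMap_congr
        intro b hb
        rw [PySem.List.mem_pyRange_one] at hb
        congr 1
        apply List.filter_congr
        intro k hk
        rw [h4] at hk
        fin_cases hk <;> simp <;> omega
      rw [hpre, PySem.List.pyRange_one_append 0 (4 * (N:Int)) wl (by positivity) (by omega)]
      congr 1
      -- last chunk: pyRange (4N) wl 1 with 4N < wl ≤ 4N+4
      rw [h4]
      simp only [List.flatMap_cons, List.flatMap_nil, List.append_nil]
      have hd : wl = 4*(N:Int)+1 ∨ wl = 4*(N:Int)+2 ∨ wl = 4*(N:Int)+3 ∨ wl = 4*(N:Int)+4 := by push_cast at h; omega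
      rcases hd with rfl | rfl | rfl | rfl <;>
        (simp only [List.filter_cons, List.filter_nil]; norm_num) <;>
        ((repeat rw [PySem.List.pyRange_one_cons (by omega)]);
         rw [PySem.List.pyRange_one_eq_nil (by omega)] <;> simp <;> omega)

theorem ports_agree (group wave_len high_len : Int) (data : List Int) (start : Int) :
    parse_wave group wave_len high_len data start = parse_wave_alt group wave_len high_len data start := by
  unfold parse_wave parse_wave_alt
  dsimp only
  rw [show (fun (st : List Int × Int) n =>
        (PySem.List.pyRange 0 wave_len 1).foldl (fun (st : List Int × Int) j =>
          (st.1.set st.2.toNat (calculate wave_len high_len data start n j), st.2 + 1)) st)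
      = (fun (st : List Int × Int) n => pvWrite st ((PySem.List.pyRange 0 wave_len 1).map (calculate wave_len high_len data start n)))
    from funext fun st => funext fun n => foldl_write_map _ _ _]
  rw [show (fun (st : List Int × Int) n =>
        (PySem.List.pyRange 0 (PySem.Int.floordiv (wave_len + 3) 4) 1).foldl (fun (st : List Int × Int) b =>
          (PySem.List.pyRange 0 4 1).foldl (fun (st : List Int × Int) k =>
            if 4 * b + k < wave_len then
              (st.1.set st.2.toNat (sample (PySem.Int.band ((PySem.List.pyGet? data (n * (wave_len + high_len) + start + b)).getD 0) 0xFF) k ((PySem.List.pyGet? data (n * (wave_len + high_len) + start + high_len + (4 * b + k))).getD 0)), st.2 + 1)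
            else st) st) st)
      = (fun (st : List Int × Int) n => pvWrite st ((PySem.List.pyRange 0 (PySem.Int.floordiv (wave_len + 3) 4) 1).flatMap
          (fun b => (((PySem.List.pyRange 0 4 1).filter (fun k => decide (4 * b + k < wave_len))).map
            (fun k => sample (PySem.Int.band ((PySem.List.pyGet? data (n * (wave_len + high_len) + start + b)).getD 0) 0xFF) k ((PySem.List.pyGet? data (n * (wave_len + high_len) + start + high_len + (4 * b + k))).getD 0))))))
    from funext fun st => funext fun n => by
      rw [show (fun (st : List Int × Int) b =>
            (PySem.List.pyRange 0 4 1).foldl (fun (st : List Int × Int) k =>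
              if 4 * b + k < wave_len then
                (st.1.set st.2.toNat (sample (PySem.Int.band ((PySem.List.pyGet? data (n * (wave_len + high_len) + start + b)).getD 0) 0xFF) k ((PySem.List.pyGet? data (n * (wave_len + high_len) + start + high_len + (4 * b + k))).getD 0)), st.2 + 1)
              else st) st)
          = (fun (st : List Int × Int) b => pvWrite st (((PySem.List.pyRange 0 4 1).filter (fun k => decide (4 * b + k < wave_len))).map
              (fun k => sample (PySem.Int.band ((PySem.List.pyGet? data (n * (wave_len + high_len) + start + b)).getD 0) 0xFF) k ((PySem.List.pyGet? data (n * (wave_len + high_len) + start + high_len + (4 * b + k))).getD 0))))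
        from funext fun st => funext fun b => foldl_write_filter_map _ _ _ _]
      rw [foldl_write_flatMap]]
  rw [foldl_write_flatMap, foldl_write_flatMap]
  congr 1
  apply congrArg
  apply List.flatMap_congr
  intro n hn
  have hN : PySem.List.pyRange 0 (PySem.Int.floordiv (wave_len + 3) 4) 1
      = PySem.List.pyRange 0 (((PySem.Int.floordiv (wave_len + 3) 4).toNat : Nat) : Int) 1 := by
    by_cases h : 0 ≤ PySem.Int.floordiv (wave_len + 3) 4
    · rw [Int.toNat_of_nonneg h]
    · rw [PySem.List.pyRange_one_eq_nil (by omega), PySem.List.pyRange_one_eq_nil (by omega)]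
  have hwl : wave_len ≤ 4 * ((PySem.Int.floordiv (wave_len + 3) 4).toNat : Nat) := by
    rw [PySem.Int.floordiv_eq_ediv_of_pos (by norm_num)]
    omega
  rw [hN, chunk_aux _ wave_len hwl, List.map_flatMap]
  apply List.flatMap_congr
  intro b hb
  rw [PySem.List.mem_pyRange_one] at hb
  rw [List.map_map]
  apply List.map_congr_left
  intro k hk
  have hk' := (List.mem_filter.mp hk).1
  rw [PySem.List.mem_pyRange_one] at hk'
  exact calc_eq wave_len high_len data start n b k hb.1 hk'.1 hk'.2

-- ===== VERDICT (by name: the statement is the Claim_ definition above) =====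
theorem parse_wave_spec : Claim_equal_parse_wave := by
  intro group wave_len high_len data start _ _
  unfold Spec_parse_wave
  exact ports_agree group wave_len high_len data start
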